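-- pv_equiv track=rewrite | github.com/Tyler2025/PRA-on-Military | PRA_Train.py | connect_sub_graph
-- ===== SOURCE A (Python) =====
-- def connect_sub_graph(sub_graph_start,sub_graph_target):
--     """连接两个子图特征"""
--     potential_path=[]
--     for target_intermedia in sub_graph_target:
--         for source_intermedia in sub_graph_start:
--             if target_intermedia[-1] == source_intermedia[-1]:
--                 temp = source_intermedia[:-1] + list(reversed(target_intermedia))
--                 potential_path.append(temp)
--     return potential_path
-- ===== SOURCE B (Python) =====
-- def connect_sub_graph(sub_graph_start, sub_graph_target):
--     """连接两个子图特征 (dict-indexed join)"""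
--     if not sub_graph_start or not sub_graph_target:
--         return []
--     index = {}
--     for s in sub_graph_start:
--         index.setdefault(s[-1], []).append(s[:-1])
--     result = []
--     for t in sub_graph_target:
--         rev = list(reversed(t))
--         for prefix in index.get(t[-1], []):
--             result.append(prefix + rev)
--     return result
-- ===== Notes on version B (the rewrite author's own statement) =====
-- stated objective: alternative
-- what changed: replaces the nested source-scan per target by a dict built once mapping each source path's last element to its prefixes, then one lookup per target; avoids rescanning sources but output construction dominates, so similar cost on dense matches
import Mathlib
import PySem

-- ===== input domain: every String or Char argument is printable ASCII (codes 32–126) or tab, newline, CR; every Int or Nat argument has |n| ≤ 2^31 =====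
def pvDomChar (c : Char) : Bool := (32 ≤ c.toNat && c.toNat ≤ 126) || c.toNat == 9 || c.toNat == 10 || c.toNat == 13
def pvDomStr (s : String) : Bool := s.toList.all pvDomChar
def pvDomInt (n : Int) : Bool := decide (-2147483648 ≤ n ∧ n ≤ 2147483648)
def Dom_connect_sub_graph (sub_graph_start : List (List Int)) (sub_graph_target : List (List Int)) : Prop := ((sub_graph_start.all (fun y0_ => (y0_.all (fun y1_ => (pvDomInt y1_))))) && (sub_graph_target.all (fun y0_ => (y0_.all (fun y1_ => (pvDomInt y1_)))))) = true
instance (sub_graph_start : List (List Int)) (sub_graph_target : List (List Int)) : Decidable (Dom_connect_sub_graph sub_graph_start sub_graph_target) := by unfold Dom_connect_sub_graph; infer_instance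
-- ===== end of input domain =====

-- B replaces A's nested per-target scan of the sources by a dict indexing sources by last element (alternative algorithm).


-- ===== PORT A =====
-- nested loops: for each target, scan every source; match on last elements (t[-1]/s[-1] = pyGet? (-1); none = IndexError, excluded by Pre_)
def connect_sub_graph (sub_graph_start : List (List Int)) (sub_graph_target : List (List Int)) : List (List Int) :=
  sub_graph_target.foldl (fun acc t =>
    sub_graph_start.foldl (fun acc2 s =>
      match PySem.List.pyGet? t (-1), PySem.List.pyGet? s (-1) with
      | some a, some b =>
          if a = b then acc2 ++ [PySem.List.slice s none (some (-1)) ++ t.reverse] else acc2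
      | _, _ => acc2) acc) []

-- ===== PORT B =====
-- index sources by last element once (setdefault/append = Dict.modify with default []), then one lookup per target
def connect_sub_graph_alt (sub_graph_start : List (List Int)) (sub_graph_target : List (List Int)) : List (List Int) :=
  if sub_graph_start = [] ∨ sub_graph_target = [] then []
  else
    let index : PySem.Dict Int (List (List Int)) :=
      sub_graph_start.foldl (fun d s =>
        match PySem.List.pyGet? s (-1) with
        | some k => PySem.Dict.modify d k [] (fun l => l ++ [PySem.List.slice s none (some (-1))])
        | none => d) PySem.Dict.empty
    sub_graph_target.foldl (fun acc t =>
      match PySem.List.pyGet? t (-1) with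
      | some k => acc ++ (PySem.Dict.getD index k []).map (fun p => p ++ t.reverse)
      | none => acc) []

-- ===== PRECONDITION & SPEC =====
-- Pre_ excludes exactly the inputs where A raises IndexError ([-1] on an empty inner list,
-- reached only when both outer lists are nonempty); B raises there too.
def Pre_connect_sub_graph (sub_graph_start : List (List Int)) (sub_graph_target : List (List Int)) : Prop :=
  sub_graph_start = [] ∨ sub_graph_target = [] ∨
    ((∀ s ∈ sub_graph_start, s ≠ []) ∧ (∀ t ∈ sub_graph_target, t ≠ []))
instance (sub_graph_start : List (List Int)) (sub_graph_target : List (List Int)) : Decidable (Pre_connect_sub_graph sub_graph_start sub_graph_target) := by unfold Pre_connect_sub_graph; infer_instance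
def pvWitness_connect_sub_graph : List (List Int) × List (List Int) := ([[1, 2], [3, 2], [4, 5]], [[7, 2], [8, 5]])
def Spec_connect_sub_graph (sub_graph_start : List (List Int)) (sub_graph_target : List (List Int)) (out : List (List Int)) : Prop := out = connect_sub_graph_alt sub_graph_start sub_graph_target
instance (sub_graph_start : List (List Int)) (sub_graph_target : List (List Int)) (out : List (List Int)) : Decidable (Spec_connect_sub_graph sub_graph_start sub_graph_target out) := by unfold Spec_connect_sub_graph; infer_instance

-- ===== CLAIM (what is proved, stated in full; the proofs are below) =====
def Claim_equal_connect_sub_graph : Prop := ∀ (sub_graph_start : List (List Int)) (sub_graph_target : List (List Int)), Dom_connect_sub_graph sub_graph_start sub_graph_target → Pre_connect_sub_graph sub_graph_start sub_graph_target → Spec_connect_sub_graph sub_graph_start sub_graph_target (connect_sub_graph sub_graph_start sub_graph_target)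

-- ===== LEMMAS AND PROOFS =====

-- the index built by B maps k to the prefixes of the sources whose last element is k, in order
theorem pv_index_getD (st : List (List Int))
    (d : PySem.Dict Int (List (List Int))) (k : Int) :
    (st.foldl (fun d s =>
        match PySem.List.pyGet? s (-1) with
        | some k => PySem.Dict.modify d k [] (fun l => l ++ [PySem.List.slice s none (some (-1))])
        | none => d) d).getD k []
      = d.getD k [] ++
        ((st.filter (fun s => PySem.List.pyGet? s (-1) == some k)).map
          (fun s => PySem.List.slice s none (some (-1)))) := by
  induction st generalizing d with
  | nil => simp
  | cons s st ih =>
    simp only [List.foldl_cons, List.filter_cons]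
    cases hs : PySem.List.pyGet? s (-1) with
    | none => simp [ih]
    | some ks =>
      rw [ih]
      by_cases hk : ks = k
      · subst hk
        simp [PySem.Dict.getD_modify_self]
      · simp [PySem.Dict.getD_modify_of_ne _ _ _ (Ne.symm hk), hk]

-- A's inner loop over the sources is a filter-map when t[-1] has been evaluated to kt
theorem pv_inner_loop (st : List (List Int)) (t : List Int) (kt : Int) (acc : List (List Int)) :
    (st.foldl (fun acc2 s =>
      match (some kt : Option Int), PySem.List.pyGet? s (-1) with
      | some a, some b =>
          if a = b then acc2 ++ [PySem.List.slice s none (some (-1)) ++ t.reverse] else acc2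
      | _, _ => acc2) acc)
      = acc ++ ((st.filter (fun s => PySem.List.pyGet? s (-1) == some kt)).map
          (fun s => PySem.List.slice s none (some (-1)) ++ t.reverse)) := by
  induction st generalizing acc with
  | nil => simp
  | cons s st ih =>
    simp only [List.foldl_cons, List.filter_cons]
    cases hs : PySem.List.pyGet? s (-1) with
    | none => simp [hs, ih]
    | some ks =>
      by_cases hk : ks = kt
      · subst hk; simp [ih]
      · simp [hs, hk, Ne.symm hk, ih]

theorem pv_pyGet_last (t : List Int) (h : t ≠ []) :
    ∃ k, PySem.List.pyGet? t (-1) = some k := by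
  cases t with
  | nil => exact absurd rfl h
  | cons x xs => simp [PySem.List.pyGet?, PySem.List.pyIdx?]

-- the two outer loops agree from any common accumulator (sources with no last element match nothing on either side)
theorem pv_outer (st tg : List (List Int)) (ht : ∀ t ∈ tg, t ≠ []) (acc : List (List Int)) :
    (tg.foldl (fun acc t =>
      st.foldl (fun acc2 s =>
        match PySem.List.pyGet? t (-1), PySem.List.pyGet? s (-1) with
        | some a, some b =>
            if a = b then acc2 ++ [PySem.List.slice s none (some (-1)) ++ t.reverse] else acc2
        | _, _ => acc2) acc) acc)
    = (tg.foldl (fun acc t =>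
        match PySem.List.pyGet? t (-1) with
        | some k => acc ++ ((PySem.Dict.getD (st.foldl (fun d s =>
            match PySem.List.pyGet? s (-1) with
            | some k => PySem.Dict.modify d k [] (fun l => l ++ [PySem.List.slice s none (some (-1))])
            | none => d) PySem.Dict.empty) k []).map (fun p => p ++ t.reverse))
        | none => acc) acc) := by
  induction tg generalizing acc with
  | nil => rfl
  | cons t tg ih =>
    obtain ⟨kt, hkt⟩ := pv_pyGet_last t (ht t (by simp))
    simp only [List.foldl_cons, hkt]
    rw [pv_inner_loop st t kt acc, pv_index_getD st PySem.Dict.empty kt]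
    simp only [PySem.Dict.getD_empty, List.nil_append, List.map_map, Function.comp_def]
    exact ih (fun t' h' => ht t' (List.mem_cons_of_mem _ h')) _

-- ===== VERDICT (by name: the statement is the Claim_ definition above) =====
theorem connect_sub_graph_spec : Claim_equal_connect_sub_graph := by
  intro st tg _ hpre
  unfold Spec_connect_sub_graph
  by_cases htriv : st = [] ∨ tg = []
  · rcases htriv with h | h <;> subst h <;>
      simp [connect_sub_graph, connect_sub_graph_alt, List.foldl_fixed]
  · have ht : ∀ t ∈ tg, t ≠ [] := by
      rcases hpre with h | h | h
      · exact absurd (Or.inl h) htriv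
      · exact absurd (Or.inr h) htriv
      · exact h.2
    simp only [connect_sub_graph, connect_sub_graph_alt, if_neg htriv]
    exact pv_outer st tg ht []
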